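-- pv_equiv track=rewrite | github.com/ruoyeruolan/Pratices | leetcode/Daily/CheckParenthesesStringCanBeValid/StringBeValid.py | canBeVaild
-- ===== SOURCE A (Python) =====
-- def canBeVaild(s: str, locked: str) -> bool:
--     length = len(s)
--     if length % 2 == 1:
--         return False
--
--     op = []
--     unlocked = []
--     for i in range(length):
--         if locked[i] == '0':
--             unlocked.append(i)
--         elif s[i] == '(':
--             op.append(i)
--         elif s[i] == ')':
--             if op:
--                 op.pop()
--             elif unlocked:
--                 unlocked.pop()
--             else:
--                 return False
--
--     while op and unlocked and op[-1] < unlocked[-1]: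
--         op.pop()
--         unlocked.pop()
--     if op:
--         return False
--     return True
-- ===== SOURCE B (Python) =====
-- def canBeVaild(s: str, locked: str) -> bool:
--     n = len(s)
--     if n % 2 == 1:
--         return False
--     bal = 0
--     for i in range(n):
--         if locked[i] == '0' or s[i] == '(':
--             bal += 1
--         elif s[i] == ')':
--             bal -= 1
--             if bal < 0:
--                 return False
--     bal = 0
--     for i in range(n - 1, -1, -1):
--         if locked[i] == '0' or s[i] == ')':
--             bal += 1
--         elif s[i] == '(':
--             bal -= 1
--             if bal < 0:
--                 return False
--     return True
-- ===== Notes on version B (the rewrite author's own statement) =====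
-- stated objective: simpler
-- what changed: Replaces A's two index-stacks and its final stack-matching while-loop with the classic two-pass greedy balance counters (a forward and a backward scan), keeping the odd-length early exit.
-- outside the precondition, e.g. on canBeVaild('))', '1'): A returns False, B returns False
import Mathlib
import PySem

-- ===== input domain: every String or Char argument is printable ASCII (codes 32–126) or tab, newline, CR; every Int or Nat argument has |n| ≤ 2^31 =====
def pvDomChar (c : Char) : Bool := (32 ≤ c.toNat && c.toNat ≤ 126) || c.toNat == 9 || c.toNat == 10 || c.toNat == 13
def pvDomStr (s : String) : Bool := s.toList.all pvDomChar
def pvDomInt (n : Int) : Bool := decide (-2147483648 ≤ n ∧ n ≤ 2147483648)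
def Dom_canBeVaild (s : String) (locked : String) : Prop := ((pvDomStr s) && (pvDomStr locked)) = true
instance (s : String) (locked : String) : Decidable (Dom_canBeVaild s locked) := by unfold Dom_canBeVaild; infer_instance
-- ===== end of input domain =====

-- B replaces A's two index-stacks and final stack-matching phase with the classic
-- two-pass greedy balance counters (forward and backward); objective: simpler, same O(n) cost.

-- ===== PORT A =====
-- A's scan loop: stacks of indices (head = Python list's end/top);
-- `none` = the `return False` inside the loop.  The `.getD '?'` default is
-- unreachable under Pre_canBeVaild (all indexed positions are in range there).
def pvScanA (sl ll : List Char) (n : Nat) (i : Nat) (op un : List Int) :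
    Option (List Int × List Int) :=
  if _h : i < n then
    let lc := (PySem.List.pyGet? ll (i : Int)).getD '?'   -- locked[i]
    let sc := (PySem.List.pyGet? sl (i : Int)).getD '?'   -- s[i]
    if lc = '0' then pvScanA sl ll n (i+1) op ((i : Int) :: un)
    else if sc = '(' then pvScanA sl ll n (i+1) ((i : Int) :: op) un
    else if sc = ')' then
      match op, un with
      | _ :: op', _       => pvScanA sl ll n (i+1) op' un
      | [],      _ :: un' => pvScanA sl ll n (i+1) [] un'
      | [],      []       => none
    else pvScanA sl ll n (i+1) op un
  else some (op, un)
  termination_by n - i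

-- A's final `while op and unlocked and op[-1] < unlocked[-1]` loop followed by `if op: return False`.
def pvMatchdown : List Int → List Int → Bool
  | [], _ => true
  | _ :: _, [] => false
  | o :: op, u :: un => if o < u then pvMatchdown op un else false

def canBeVaild (s : String) (locked : String) : Bool :=
  let sl := s.toList
  let n := sl.length
  if PySem.Int.mod (n : Int) 2 == 1 then false
  else
    match pvScanA sl locked.toList n 0 [] [] with
    | none => false
    | some (op, un) => pvMatchdown op un

-- ===== PORT B =====
-- B's forward pass (returns false = early `return False`).
def pvFwdB (sl ll : List Char) (n : Nat) (i : Nat) (bal : Int) : Bool :=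
  if _h : i < n then
    let lc := (PySem.List.pyGet? ll (i : Int)).getD '?'
    let sc := (PySem.List.pyGet? sl (i : Int)).getD '?'
    if lc = '0' || sc = '(' then pvFwdB sl ll n (i+1) (bal + 1)
    else if sc = ')' then
      if bal - 1 < 0 then false else pvFwdB sl ll n (i+1) (bal - 1)
    else pvFwdB sl ll n (i+1) bal
  else true
  termination_by n - i

-- B's backward pass: `pvBwdB sl ll i bal` processes indices i-1, i-2, …, 0.
def pvBwdB (sl ll : List Char) : Nat → Int → Bool
  | 0, _ => true
  | i+1, bal =>
    let lc := (PySem.List.pyGet? ll (i : Int)).getD '?'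
    let sc := (PySem.List.pyGet? sl (i : Int)).getD '?'
    if lc = '0' || sc = ')' then pvBwdB sl ll i (bal + 1)
    else if sc = '(' then
      if bal - 1 < 0 then false else pvBwdB sl ll i (bal - 1)
    else pvBwdB sl ll i bal

def canBeVaild_alt (s : String) (locked : String) : Bool :=
  let sl := s.toList
  let n := sl.length
  if PySem.Int.mod (n : Int) 2 == 1 then false
  else pvFwdB sl locked.toList n 0 0 && pvBwdB sl locked.toList n 0

-- ===== PRECONDITION & SPEC =====
-- Pre_ excludes even-length inputs whose `locked` is shorter than `s`, on which A's
-- `locked[i]` indexing can raise IndexError; on some of those A still returns False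
-- early (B agrees there, see cites), but the exact raising set is not closed-form.
def Pre_canBeVaild (s : String) (locked : String) : Prop :=
  s.toList.length % 2 = 1 ∨ s.toList.length ≤ locked.toList.length
instance (s : String) (locked : String) : Decidable (Pre_canBeVaild s locked) := by
  unfold Pre_canBeVaild; infer_instance

def pvWitness_canBeVaild : String × String := ("()", "10")

def Spec_canBeVaild (s : String) (locked : String) (out : Bool) : Prop := out = canBeVaild_alt s locked
instance (s : String) (locked : String) (out : Bool) : Decidable (Spec_canBeVaild s locked out) := by
  unfold Spec_canBeVaild; infer_instance

-- ===== CLAIM (what is proved, stated in full; the proofs are below) =====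
def Claim_equal_canBeVaild : Prop := ∀ (s : String) (locked : String), Dom_canBeVaild s locked → Pre_canBeVaild s locked → Spec_canBeVaild s locked (canBeVaild s locked)

-- ===== LEMMAS AND PROOFS =====

-- Character kinds as A classifies them: wildcard (locked '0'), open, close, neutral.
inductive PK where
  | W | O | C | N
deriving DecidableEq, Repr

def pkOf (sc lc : Char) : PK :=
  if lc = '0' then .W else if sc = '(' then .O else if sc = ')' then .C else .N

def pkList (sl ll : List Char) : List PK :=
  (sl.zip ll).map (fun p => pkOf p.1 p.2)

-- Kind-level version of A's scan.
def scanK : List PK → Int → List Int → List Int → Option (List Int × List Int)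
  | [], _, op, un => some (op, un)
  | .W :: l, i, op, un => scanK l (i+1) op (i :: un)
  | .O :: l, i, op, un => scanK l (i+1) (i :: op) un
  | .C :: l, i, op, un =>
      match op, un with
      | _ :: op', _       => scanK l (i+1) op' un
      | [],      _ :: un' => scanK l (i+1) [] un'
      | [],      []       => none
  | .N :: l, i, op, un => scanK l (i+1) op un

-- Kind-level forward counter (none = forward pass fails).
def runfK : List PK → Int → Option Int
  | [], c => some c
  | .W :: l, c => runfK l (c+1)
  | .O :: l, c => runfK l (c+1)
  | .C :: l, c => if c - 1 < 0 then none else runfK l (c-1)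
  | .N :: l, c => runfK l c

-- Kind-level backward counter, applied to the reversed list.
def gOkK : List PK → Int → Bool
  | [], _ => true
  | .W :: l, c => gOkK l (c+1)
  | .C :: l, c => gOkK l (c+1)
  | .O :: l, c => if c - 1 < 0 then false else gOkK l (c-1)
  | .N :: l, c => gOkK l c

-- ---- bridges between the index-based ports and the kind-level recursions ----

theorem pkList_drop_cons (sl ll : List Char) (i : Nat)
    (hi : i < sl.length) (hl : sl.length ≤ ll.length) :
    (pkList sl ll).drop i = pkOf sl[i] ll[i] :: (pkList sl ll).drop (i+1) := by
  have hlen : (pkList sl ll).length = sl.length := by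
    simp [pkList, List.length_zip]; omega
  have hi' : i < (pkList sl ll).length := by omega
  rw [List.drop_eq_getElem_cons hi']
  congr 1
  simp [pkList]

theorem bridgeA (sl ll : List Char) (hl : sl.length ≤ ll.length) :
    ∀ k i op un, i + k = sl.length →
      pvScanA sl ll sl.length i op un = scanK ((pkList sl ll).drop i) i op un := by
  intro k
  induction k with
  | zero =>
    intro i op un hik
    have hi : ¬ i < sl.length := by omega
    have hdrop : (pkList sl ll).drop i = [] := by
      apply List.drop_eq_nil_of_le
      simp [pkList, List.length_zip]; omega
    rw [pvScanA.eq_def, dif_neg hi, hdrop, scanK]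
  | succ k ih =>
    intro i op un hik
    have hi : i < sl.length := by omega
    have hil : i < ll.length := by omega
    rw [pvScanA.eq_def, dif_pos hi, pkList_drop_cons sl ll i hi hl]
    have hgl : (PySem.List.pyGet? ll (i : Int)).getD '?' = ll[i] := by
      simp [PySem.List.pyGet?_natCast, List.getElem?_eq_getElem hil]
    have hgs : (PySem.List.pyGet? sl (i : Int)).getD '?' = sl[i] := by
      simp [PySem.List.pyGet?_natCast, List.getElem?_eq_getElem hi]
    simp only [hgl, hgs]
    by_cases h0 : ll[i] = '0'
    · simp [h0, pkOf, scanK, ih (i+1) op ((i : Int) :: un) (by omega)]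
    · by_cases hop : sl[i] = '('
      · simp [h0, hop, pkOf, scanK, ih (i+1) ((i : Int) :: op) un (by omega)]
      · by_cases hcl : sl[i] = ')'
        · simp only [h0, hop, hcl, if_false, if_true, pkOf, if_neg h0, if_neg hop, if_pos hcl, scanK]
          match op, un with
          | _ :: op', _       => exact ih (i+1) op' _ (by omega)
          | [],      _ :: un' => exact ih (i+1) [] un' (by omega)
          | [],      []       => rfl
        · simp [h0, hop, hcl, pkOf, scanK, ih (i+1) op un (by omega)]

theorem bridgeFwd (sl ll : List Char) (hl : sl.length ≤ ll.length) :
    ∀ k i bal, i + k = sl.length →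
      pvFwdB sl ll sl.length i bal = (runfK ((pkList sl ll).drop i) bal).isSome := by
  intro k
  induction k with
  | zero =>
    intro i bal hik
    have hi : ¬ i < sl.length := by omega
    have hdrop : (pkList sl ll).drop i = [] := by
      apply List.drop_eq_nil_of_le
      simp [pkList, List.length_zip]; omega
    rw [pvFwdB, dif_neg hi, hdrop, runfK]; rfl
  | succ k ih =>
    intro i bal hik
    have hi : i < sl.length := by omega
    have hil : i < ll.length := by omega
    rw [pvFwdB, dif_pos hi, pkList_drop_cons sl ll i hi hl]
    have hgl : (PySem.List.pyGet? ll (i : Int)).getD '?' = ll[i] := by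
      simp [PySem.List.pyGet?_natCast, List.getElem?_eq_getElem hil]
    have hgs : (PySem.List.pyGet? sl (i : Int)).getD '?' = sl[i] := by
      simp [PySem.List.pyGet?_natCast, List.getElem?_eq_getElem hi]
    simp only [hgl, hgs]
    by_cases h0 : ll[i] = '0'
    · simp [h0, pkOf, runfK, ih (i+1) (bal+1) (by omega)]
    · by_cases hop : sl[i] = '('
      · simp [h0, hop, pkOf, runfK, ih (i+1) (bal+1) (by omega)]
      · by_cases hcl : sl[i] = ')'
        · by_cases hneg : bal - 1 < 0
          · simp [h0, hop, hcl, hneg, pkOf, runfK]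
          · simp [h0, hop, hcl, hneg, pkOf, runfK, ih (i+1) (bal-1) (by omega)]
        · simp [h0, hop, hcl, pkOf, runfK, ih (i+1) bal (by omega)]

theorem pkList_take_succ (sl ll : List Char) (i : Nat)
    (hi : i < sl.length) (hl : sl.length ≤ ll.length) :
    (pkList sl ll).take (i+1) = (pkList sl ll).take i ++ [pkOf sl[i] ll[i]] := by
  have hi' : i < (pkList sl ll).length := by
    simp [pkList, List.length_zip]; omega
  rw [List.take_succ, List.getElem?_eq_getElem hi']
  congr 1
  simp [pkList]

theorem bridgeBwd (sl ll : List Char) (hl : sl.length ≤ ll.length) :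
    ∀ i bal, i ≤ sl.length →
      pvBwdB sl ll i bal = gOkK ((pkList sl ll).take i).reverse bal := by
  intro i
  induction i with
  | zero => intro bal _; rw [pvBwdB]; simp [gOkK]
  | succ i ih =>
    intro bal hi'
    have hi : i < sl.length := by omega
    have hil : i < ll.length := by omega
    rw [pvBwdB, pkList_take_succ sl ll i hi hl, List.reverse_append]
    have hgl : (PySem.List.pyGet? ll (i : Int)).getD '?' = ll[i] := by
      simp [PySem.List.pyGet?_natCast, List.getElem?_eq_getElem hil]
    have hgs : (PySem.List.pyGet? sl (i : Int)).getD '?' = sl[i] := by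
      simp [PySem.List.pyGet?_natCast, List.getElem?_eq_getElem hi]
    simp only [hgl, hgs, List.reverse_cons, List.reverse_nil, List.nil_append,
      List.cons_append, List.singleton_append]
    by_cases h0 : ll[i] = '0'
    · simp [h0, pkOf, gOkK, ih (bal+1) (by omega)]
    · by_cases hcl : sl[i] = ')'
      · have hop : ¬ sl[i] = '(' := by simp [hcl]
        simp [h0, hcl, hop, pkOf, gOkK, ih (bal+1) (by omega)]
      · by_cases hop : sl[i] = '('
        · by_cases hneg : bal - 1 < 0
          · simp [h0, hcl, hop, hneg, pkOf, gOkK]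
          · simp [h0, hcl, hop, hneg, pkOf, gOkK, ih (bal-1) (by omega)]
        · simp [h0, hcl, hop, pkOf, gOkK, ih bal (by omega)]

-- ---- kind-level facts ----

theorem scanK_append (p q : List PK) :
    ∀ i op un, scanK (p ++ q) i op un =
      match scanK p i op un with
      | none => none
      | some (o, u) => scanK q (i + p.length) o u := by
  induction p with
  | nil => intro i op un; simp [scanK]
  | cons x p ih =>
    intro i op un
    have harith : ∀ (o u : List Int), scanK q (i + 1 + (p.length : Int)) o u
        = scanK q (i + ((PK.W :: p).length : Int)) o u := by
      intro o u; congr 1; simp; ring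
    cases x with
    | W =>
      simp only [List.cons_append, scanK, ih]
      cases scanK p (i+1) op (i :: un) with
      | none => rfl
      | some st => obtain ⟨o, u⟩ := st; exact harith o u
    | O =>
      simp only [List.cons_append, scanK, ih]
      cases scanK p (i+1) (i :: op) un with
      | none => rfl
      | some st => obtain ⟨o, u⟩ := st; exact harith o u
    | N =>
      simp only [List.cons_append, scanK, ih]
      cases scanK p (i+1) op un with
      | none => rfl
      | some st => obtain ⟨o, u⟩ := st; exact harith o u
    | C =>
      cases op with
      | cons a op' =>
        simp only [List.cons_append, scanK, ih]
        cases scanK p (i+1) op' un with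
        | none => rfl
        | some st => obtain ⟨o, u⟩ := st; exact harith o u
      | nil =>
        cases un with
        | cons b un' =>
          simp only [List.cons_append, scanK, ih]
          cases scanK p (i+1) [] un' with
          | none => rfl
          | some st => obtain ⟨o, u⟩ := st; exact harith o u
        | nil => simp only [List.cons_append, scanK]

theorem runfK_append (p q : List PK) :
    ∀ c, runfK (p ++ q) c =
      match runfK p c with
      | none => none
      | some c' => runfK q c' := by
  induction p with
  | nil => intro c; simp [runfK]
  | cons x p ih =>
    intro c
    cases x with
    | W => simp only [List.cons_append, runfK, ih]
    | O => simp only [List.cons_append, runfK, ih]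
    | N => simp only [List.cons_append, runfK, ih]
    | C =>
      by_cases h : c - 1 < 0
      · simp [runfK, h]
      · simp only [List.cons_append, runfK, if_neg h, ih]

-- After a successful scan the forward counter equals the total stack size;
-- the scan fails exactly when the forward counter fails.
theorem runfK_congr (l : List PK) {c c' : Int} (h : c = c') : runfK l c = runfK l c' := by rw [h]

theorem scanK_run (l : List PK) :
    ∀ i op un,
      (scanK l i op un = none → runfK l ((op.length : Int) + un.length) = none) ∧
      (∀ o u, scanK l i op un = some (o, u) →
        runfK l ((op.length : Int) + un.length) = some ((o.length : Int) + u.length)) := by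
  induction l with
  | nil =>
    intro i op un
    refine ⟨fun h => by simp [scanK] at h, fun o u h => ?_⟩
    simp only [scanK, Option.some_inj, Prod.mk.injEq] at h
    simp [runfK, h.1, h.2]
  | cons x l ih =>
    intro i op un
    cases x with
    | W =>
      have h1 := ih (i+1) op (i :: un)
      have hc : runfK (PK.W :: l) ((op.length : Int) + un.length)
          = runfK l ((op.length : Int) + (i :: un).length) := by
        simp only [runfK]
        exact runfK_congr l (by push_cast [List.length_cons]; ring)
      refine ⟨fun h => ?_, fun o u h => ?_⟩
      · simp only [scanK] at h; rw [hc]; exact h1.1 h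
      · simp only [scanK] at h; rw [hc]; exact h1.2 o u h
    | O =>
      have h1 := ih (i+1) (i :: op) un
      have hc : runfK (PK.O :: l) ((op.length : Int) + un.length)
          = runfK l (((i :: op).length : Int) + un.length) := by
        simp only [runfK]
        exact runfK_congr l (by push_cast [List.length_cons]; ring)
      refine ⟨fun h => ?_, fun o u h => ?_⟩
      · simp only [scanK] at h; rw [hc]; exact h1.1 h
      · simp only [scanK] at h; rw [hc]; exact h1.2 o u h
    | N =>
      have h1 := ih (i+1) op un
      refine ⟨fun h => ?_, fun o u h => ?_⟩
      · simp only [scanK] at h; simp only [runfK]; exact h1.1 h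
      · simp only [scanK] at h; simp only [runfK]; exact h1.2 o u h
    | C =>
      cases op with
      | cons a op' =>
        have h1 := ih (i+1) op' un
        have hpos : ¬ ((((a :: op').length : Int) + un.length) - 1 < 0) := by
          push_cast [List.length_cons]; omega
        have hc : runfK (PK.C :: l) (((a :: op').length : Int) + un.length)
            = runfK l ((op'.length : Int) + un.length) := by
          simp only [runfK, if_neg hpos]
          exact runfK_congr l (by push_cast [List.length_cons]; ring)
        refine ⟨fun h => ?_, fun o u h => ?_⟩
        · simp only [scanK] at h; rw [hc]; exact h1.1 h
        · simp only [scanK] at h; rw [hc]; exact h1.2 o u h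
      | nil =>
        cases un with
        | cons b un' =>
          have h1 := ih (i+1) [] un'
          have hpos : ¬ (((([] : List Int).length : Int) + (b :: un').length) - 1 < 0) := by
            push_cast [List.length_cons]; omega
          have hc : runfK (PK.C :: l) ((([] : List Int).length : Int) + (b :: un').length)
              = runfK l ((([] : List Int).length : Int) + un'.length) := by
            simp only [runfK, if_neg hpos]
            exact runfK_congr l (by push_cast [List.length_cons]; ring)
          refine ⟨fun h => ?_, fun o u h => ?_⟩
          · simp only [scanK] at h; rw [hc]; exact h1.1 h
          · simp only [scanK] at h; rw [hc]; exact h1.2 o u h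
        | nil =>
          refine ⟨fun _ => ?_, fun o u h => ?_⟩
          · simp [runfK]
          · simp [scanK] at h

-- Every index left on either stack is below the current position.
theorem scanK_bounds (l : List PK) :
    ∀ i op un o u, scanK l i op un = some (o, u) →
      (∀ x ∈ op, x < i) → (∀ x ∈ un, x < i) →
      (∀ x ∈ o, x < i + l.length) ∧ (∀ x ∈ u, x < i + l.length) := by
  induction l with
  | nil =>
    intro i op un o u h hop hun
    simp only [scanK, Option.some_inj, Prod.mk.injEq] at h
    obtain ⟨rfl, rfl⟩ := h
    constructor <;> intro x hx <;> simp
    · exact lt_of_lt_of_le (hop x hx) (by omega)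
    · exact lt_of_lt_of_le (hun x hx) (by omega)
  | cons k l ih =>
    intro i op un o u h hop hun
    have hstep : ∀ op' un', (∀ x ∈ op', x < i + 1) → (∀ x ∈ un', x < i + 1) →
        scanK l (i+1) op' un' = some (o, u) →
        (∀ x ∈ o, x < i + (k :: l).length) ∧ (∀ x ∈ u, x < i + (k :: l).length) := by
      intro op' un' h1 h2 hs
      have := ih (i+1) op' un' o u hs h1 h2
      constructor <;> intro x hx
      · have := this.1 x hx; simp at *; omega
      · have := this.2 x hx; simp at *; omega
    cases k with
    | W =>
      simp only [scanK] at h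
      refine hstep op (i :: un) (fun x hx => by have := hop x hx; omega)
        (fun x hx => by rcases List.mem_cons.1 hx with rfl | hx; omega; have := hun x hx; omega) h
    | O =>
      simp only [scanK] at h
      refine hstep (i :: op) un
        (fun x hx => by rcases List.mem_cons.1 hx with rfl | hx; omega; have := hop x hx; omega)
        (fun x hx => by have := hun x hx; omega) h
    | N =>
      simp only [scanK] at h
      refine hstep op un (fun x hx => by have := hop x hx; omega)
        (fun x hx => by have := hun x hx; omega) h
    | C =>
      cases op with
      | cons a op' =>
        simp only [scanK] at h
        refine hstep op' un (fun x hx => by have := hop x (List.mem_cons_of_mem a hx); omega)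
          (fun x hx => by have := hun x hx; omega) h
      | nil =>
        cases un with
        | cons b un' =>
          simp only [scanK] at h
          refine hstep [] un' (by simp)
            (fun x hx => by have := hun x (List.mem_cons_of_mem b hx); omega) h
        | nil => simp [scanK] at h

-- matchdown with c free wildcards on top of un = matchdown after dropping c opens.
theorem md_drop_W (op un : List Int) (v : Int) (c : Nat)
    (hb : ∀ x ∈ op, x < v) :
    pvMatchdown (op.drop c) (v :: un) = pvMatchdown (op.drop (c+1)) un := by
  have hdd : op.drop (c+1) = (op.drop c).drop 1 := by
    rw [List.drop_drop]
  rw [hdd]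
  cases h : op.drop c with
  | nil => simp [pvMatchdown]
  | cons o rest =>
    have ho : o ∈ op := List.mem_of_mem_drop (h ▸ List.mem_cons_self)
    simp [pvMatchdown, hb o ho]

theorem md_O_zero (op un : List Int) (v : Int) (hb : ∀ x ∈ un, x < v) :
    pvMatchdown (v :: op) un = false := by
  cases un with
  | nil => simp [pvMatchdown]
  | cons u un' =>
    have : ¬ v < u := by have := hb u List.mem_cons_self; omega
    simp [pvMatchdown, this]

-- Nat-counter version of the backward pass (cast-free for the main induction).
def gOkN : List PK → Nat → Bool
  | [], _ => true
  | .W :: l, c => gOkN l (c+1)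
  | .C :: l, c => gOkN l (c+1)
  | .O :: _, 0 => false
  | .O :: l, c+1 => gOkN l c
  | .N :: l, c => gOkN l c

theorem gOkN_eq (l : List PK) : ∀ c : Nat, gOkN l c = gOkK l (c : Int) := by
  induction l with
  | nil => intro c; simp [gOkN, gOkK]
  | cons x l ih =>
    intro c
    cases x with
    | W => simp [gOkN, gOkK, ih (c+1), Nat.cast_add, Nat.cast_one]
    | C => simp [gOkN, gOkK, ih (c+1), Nat.cast_add, Nat.cast_one]
    | N => simp only [gOkN, gOkK, ih c]
    | O =>
      cases c with
      | zero => simp [gOkN, gOkK]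
      | succ c' =>
        have hneg : ¬ (((c' : Int) + 1) - 1 < 0) := by omega
        simp [gOkN, gOkK, ih c', Nat.cast_add, Nat.cast_one, hneg, add_sub_cancel_right]

-- The main equivalence at kind level.
theorem mainK (l : List PK) :
    ∀ c : Nat,
      (match scanK l 0 [] [] with
       | none => false
       | some (op, un) => pvMatchdown (op.drop c) un)
      = ((runfK l 0).isSome && gOkN l.reverse c) := by
  induction l using List.reverseRecOn with
  | nil => intro c; simp [scanK, runfK, gOkN, pvMatchdown]
  | append_singleton l x ih =>
    intro c
    rw [scanK_append, runfK_append, List.reverse_append, List.reverse_singleton,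
      List.singleton_append]
    cases hs : scanK l 0 [] [] with
    | none =>
      have hrun := (scanK_run l 0 [] []).1 (by simpa using hs)
      norm_num at hrun
      simp [hrun]
    | some st =>
      obtain ⟨op, un⟩ := st
      have hrun := (scanK_run l 0 [] []).2 op un (by simpa using hs)
      norm_num at hrun
      have hbnd := scanK_bounds l 0 [] [] op un (by simpa using hs) (by simp) (by simp)
      simp only [zero_add] at hbnd
      have ihx : ∀ c' : Nat,
          pvMatchdown (op.drop c') un = gOkN l.reverse c' := by
        intro c'; have h := ih c'; rw [hs, hrun] at h; simpa using h
      cases x with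
      | N =>
        rw [hrun]
        simp only [scanK, runfK, gOkN, zero_add, Option.isSome_some, Bool.true_and]
        exact ihx c
      | W =>
        rw [hrun]
        simp only [scanK, runfK, gOkN, zero_add, Option.isSome_some, Bool.true_and]
        rw [md_drop_W op un (l.length : Int) c hbnd.1]
        exact ihx (c+1)
      | O =>
        cases c with
        | zero =>
          rw [hrun]
          simp only [scanK, runfK, gOkN, zero_add, List.drop_zero]
          rw [md_O_zero op un (l.length : Int) hbnd.2]
          simp
        | succ c' =>
          rw [hrun]
          simp only [scanK, runfK, gOkN, zero_add, List.drop_succ_cons,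
            Option.isSome_some, Bool.true_and]
          exact ihx c'
      | C =>
        cases op with
        | cons a op' =>
          have hpos : ¬ ((((a :: op').length : Int) + un.length) - 1 < 0) := by
            push_cast [List.length_cons]; omega
          rw [hrun]
          simp only [scanK, runfK, gOkN, zero_add]
          rw [if_neg hpos]
          simp only [Option.isSome_some, Bool.true_and, List.drop_succ_cons]
          have h1 := ihx (c+1)
          rw [List.drop_succ_cons] at h1
          exact h1
        | nil =>
          cases un with
          | cons b un' =>
            have hpos : ¬ (((([] : List Int).length : Int) + (b :: un').length) - 1 < 0) := by
              push_cast [List.length_cons]; omega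
            rw [hrun]
            simp only [scanK, runfK, gOkN, zero_add]
            rw [if_neg hpos]
            simp only [Option.isSome_some, Bool.true_and, List.drop_nil, pvMatchdown]
            have h1 := ihx (c+1)
            simp only [List.drop_nil, pvMatchdown, Option.isSome_some, Bool.true_and] at h1
            exact h1
          | nil =>
            rw [hrun]
            norm_num [scanK, runfK]

-- ===== VERDICT (by name: the statement is the Claim_ definition above) =====
theorem canBeVaild_spec : Claim_equal_canBeVaild := by
  intro s locked _hdom hpre
  unfold Spec_canBeVaild canBeVaild canBeVaild_alt
  simp only []
  set sl := s.toList with hsl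
  set ll := locked.toList with hll
  by_cases hodd : PySem.Int.mod ((sl.length : Int)) 2 == 1
  · rw [if_pos hodd, if_pos hodd]
  · rw [if_neg hodd, if_neg hodd]
    have hle : sl.length ≤ ll.length := by
      rcases hpre with h1 | h2
      · exfalso
        apply hodd
        have hm : PySem.Int.mod ((sl.length : Int)) 2 = ((sl.length % 2 : Nat) : Int) := by
          exact_mod_cast PySem.Int.mod_natCast sl.length 2
        have h1' : sl.length % 2 = 1 := h1
        rw [hm, h1']
        norm_num
      · exact h2
    have hlen : (pkList sl ll).length = sl.length := by
      simp [pkList, List.length_zip]; omega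
    have hA : pvScanA sl ll sl.length 0 [] [] = scanK (pkList sl ll) 0 [] [] := by
      have h := bridgeA sl ll hle sl.length 0 [] [] (by omega)
      simpa using h
    have hF : pvFwdB sl ll sl.length 0 0 = (runfK (pkList sl ll) 0).isSome := by
      have h := bridgeFwd sl ll hle sl.length 0 0 (by omega)
      simpa using h
    have hB : pvBwdB sl ll sl.length 0 = gOkK (pkList sl ll).reverse 0 := by
      have h := bridgeBwd sl ll hle sl.length 0 (le_refl _)
      rw [h]
      congr 1
      rw [← hlen, List.take_length]
    rw [hA, hF, hB]
    have hm0 := mainK (pkList sl ll) 0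
    simp only [List.drop_zero] at hm0
    rw [hm0, gOkN_eq]
    norm_num
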